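-- pv_equiv track=rewrite | github.com/usnistgov/covid19-spectrum-monitoring-acquisition | sanjole/lte_helpers.py | riv_to_rb
-- ===== SOURCE A (Python) =====
-- import math
--
-- def riv_to_rb(riv,nulrb):
--     for l_crb in range(1,nulrb+1):
--         for rb_start in range(0,nulrb-l_crb+1):
--             if (l_crb-1) <= math.floor(nulrb/2):
--                 if riv == nulrb*(l_crb-1)+ rb_start:
--                     return l_crb, rb_start
--             else:
--                 if riv == nulrb*(nulrb-l_crb+1) + (nulrb-1-rb_start):
--                     return l_crb, rb_start
--     return (None,None)
-- ===== SOURCE B (Python) =====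
-- def riv_to_rb(riv, nulrb):
--     # Solve the RIV equation for rb_start per l_crb instead of scanning all rb_start.
--     half = nulrb // 2
--     for l_crb in range(1, nulrb + 1):
--         if l_crb - 1 <= half:
--             rb_start = riv - nulrb * (l_crb - 1)
--         else:
--             rb_start = nulrb - 1 - (riv - nulrb * (nulrb - l_crb + 1))
--         if 0 <= rb_start <= nulrb - l_crb:
--             return l_crb, rb_start
--     return (None, None)
-- ===== Notes on version B (the rewrite author's own statement) =====
-- stated objective: faster
-- what changed: Instead of A's nested scan over all (l_crb, rb_start) pairs, B iterates only over l_crb and algebraically solves the linear RIV equation for rb_start, range-checking the unique candidate.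
import Mathlib
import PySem

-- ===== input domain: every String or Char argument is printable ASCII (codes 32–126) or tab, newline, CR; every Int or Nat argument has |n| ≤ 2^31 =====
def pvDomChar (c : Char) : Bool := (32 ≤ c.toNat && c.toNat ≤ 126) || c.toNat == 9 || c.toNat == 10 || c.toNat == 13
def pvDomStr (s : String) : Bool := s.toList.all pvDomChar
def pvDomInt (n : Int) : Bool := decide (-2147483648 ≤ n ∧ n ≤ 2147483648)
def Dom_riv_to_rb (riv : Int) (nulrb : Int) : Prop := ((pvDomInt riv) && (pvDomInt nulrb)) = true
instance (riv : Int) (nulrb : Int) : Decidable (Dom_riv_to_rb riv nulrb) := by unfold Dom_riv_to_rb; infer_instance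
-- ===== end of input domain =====

-- B replaces A's inner scan over rb_start by algebraically solving the RIV equation per l_crb (one loop instead of two).
-- math.floor(nulrb/2) is ported as integer floor division, exact since |nulrb| ≤ 2^31 < 2^53.
-- Python's range is lazy, so each loop is ported as a counted recursion (fuel = number of iterations), iteration for iteration.

-- ===== PORT A =====
-- inner loop: for rb_start in range(0, nulrb-l_crb+1); rb is the current rb_start, fuel the remaining iterations
def rivInnerA (riv : Int) (nulrb : Int) (l_crb : Int) (rb : Int) : Nat → Option (Int × Int)
  | 0 => none
  | n + 1 =>
    if l_crb - 1 ≤ PySem.Int.floordiv nulrb 2 then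
      if riv = nulrb * (l_crb - 1) + rb then some (l_crb, rb)
      else rivInnerA riv nulrb l_crb (rb + 1) n
    else
      if riv = nulrb * (nulrb - l_crb + 1) + (nulrb - 1 - rb) then some (l_crb, rb)
      else rivInnerA riv nulrb l_crb (rb + 1) n

-- outer loop: for l_crb in range(1, nulrb+1); l is the current l_crb
def rivOuterA (riv : Int) (nulrb : Int) (l : Int) : Nat → Option (Int × Int)
  | 0 => none
  | n + 1 =>
    match rivInnerA riv nulrb l 0 (nulrb - l + 1).toNat with
    | some p => some p
    | none => rivOuterA riv nulrb (l + 1) n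

def riv_to_rb (riv : Int) (nulrb : Int) : Option Int × Option Int :=
  match rivOuterA riv nulrb 1 ((nulrb + 1) - 1).toNat with
  | some (l, r) => (some l, some r)
  | none => (none, none)

-- ===== PORT B =====
-- single loop: for l_crb in range(1, nulrb+1); solves the RIV equation for rb_start and range-checks it
def rivOuterB (riv : Int) (nulrb : Int) (half : Int) (l : Int) : Nat → Option (Int × Int)
  | 0 => none
  | n + 1 =>
    let rb := if l - 1 ≤ half then riv - nulrb * (l - 1)
              else nulrb - 1 - (riv - nulrb * (nulrb - l + 1))
    if 0 ≤ rb ∧ rb ≤ nulrb - l then some (l, rb)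
    else rivOuterB riv nulrb half (l + 1) n

def riv_to_rb_alt (riv : Int) (nulrb : Int) : Option Int × Option Int :=
  match rivOuterB riv nulrb (PySem.Int.floordiv nulrb 2) 1 ((nulrb + 1) - 1).toNat with
  | some (l, r) => (some l, some r)
  | none => (none, none)

-- ===== PRECONDITION & SPEC =====
def Spec_riv_to_rb (riv : Int) (nulrb : Int) (out : Option Int × Option Int) : Prop := out = riv_to_rb_alt riv nulrb
instance (riv : Int) (nulrb : Int) (out : Option Int × Option Int) : Decidable (Spec_riv_to_rb riv nulrb out) := by unfold Spec_riv_to_rb; infer_instance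

-- ===== CLAIM (what is proved, stated in full; the proofs are below) =====
def Claim_equal_riv_to_rb : Prop := ∀ (riv : Int) (nulrb : Int), Dom_riv_to_rb riv nulrb → Spec_riv_to_rb riv nulrb (riv_to_rb riv nulrb)

-- ===== LEMMAS AND PROOFS =====

-- scanning rb = a, a+1, … (n iterations) in the increasing branch finds exactly rb = riv - nulrb*(l-1) if it lies in [a, a+n)
theorem innerA_inc (riv nulrb l : Int) (h : l - 1 ≤ PySem.Int.floordiv nulrb 2) :
    ∀ (n : Nat) (a : Int),
      rivInnerA riv nulrb l a n =
        (if a ≤ riv - nulrb * (l - 1) ∧ riv - nulrb * (l - 1) < a + n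
         then some (l, riv - nulrb * (l - 1)) else none) := by
  intro n
  induction n with
  | zero =>
    intro a
    simp only [rivInnerA]
    split_ifs with hc
    · omega
    · rfl
  | succ k ih =>
    intro a
    simp only [rivInnerA, if_pos h]
    by_cases he : riv = nulrb * (l - 1) + a
    · rw [if_pos he]
      have hs : riv - nulrb * (l - 1) = a := by omega
      rw [hs, if_pos (by omega)]
    · rw [if_neg he, ih (a + 1)]
      split_ifs with h1 h2 <;> first | rfl | omega

-- scanning rb = a, a+1, … (n iterations) in the decreasing branch finds exactly rb = nulrb-1-(riv - nulrb*(nulrb-l+1)) if it lies in [a, a+n)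
theorem innerA_dec (riv nulrb l : Int) (h : ¬ l - 1 ≤ PySem.Int.floordiv nulrb 2) :
    ∀ (n : Nat) (a : Int),
      rivInnerA riv nulrb l a n =
        (if a ≤ nulrb - 1 - (riv - nulrb * (nulrb - l + 1)) ∧ nulrb - 1 - (riv - nulrb * (nulrb - l + 1)) < a + n
         then some (l, nulrb - 1 - (riv - nulrb * (nulrb - l + 1))) else none) := by
  intro n
  induction n with
  | zero =>
    intro a
    simp only [rivInnerA]
    split_ifs with hc
    · omega
    · rfl
  | succ k ih =>
    intro a
    simp only [rivInnerA, if_neg h]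
    by_cases he : riv = nulrb * (nulrb - l + 1) + (nulrb - 1 - a)
    · rw [if_pos he]
      have hs : nulrb - 1 - (riv - nulrb * (nulrb - l + 1)) = a := by omega
      rw [hs, if_pos (by omega)]
    · rw [if_neg he, ih (a + 1)]
      split_ifs with h1 h2 <;> first | rfl | omega

-- the two outer loops agree for any number of remaining iterations and any current l_crb
theorem outer_eq (riv nulrb : Int) :
    ∀ (n : Nat) (l : Int),
      rivOuterA riv nulrb l n = rivOuterB riv nulrb (PySem.Int.floordiv nulrb 2) l n := by
  intro n
  induction n with
  | zero => intro l; rfl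
  | succ k ih =>
    intro l
    simp only [rivOuterA, rivOuterB]
    by_cases h : l - 1 ≤ PySem.Int.floordiv nulrb 2
    · rw [innerA_inc riv nulrb l h (nulrb - l + 1).toNat 0]
      simp only [if_pos h]
      split_ifs with h1 h2
      · rfl
      · omega
      · omega
      · simpa using ih (l + 1)
    · rw [innerA_dec riv nulrb l h (nulrb - l + 1).toNat 0]
      simp only [if_neg h]
      split_ifs with h1 h2
      · rfl
      · omega
      · omega
      · simpa using ih (l + 1)

-- ===== VERDICT (by name: the statement is the Claim_ definition above) =====
theorem riv_to_rb_spec : Claim_equal_riv_to_rb := by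
  intro riv nulrb _
  unfold Spec_riv_to_rb riv_to_rb riv_to_rb_alt
  rw [outer_eq]
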